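-- pv_equiv track=rewrite | github.com/pans9605/AI_LAB | Unification.py | apply
-- ===== SOURCE A (Python) =====
-- def is_var(t):
--     return len(t) == 1 and t.islower()
--
-- def parse_term(term):
--     term = term.strip()
--     if "(" not in term:
--         return term, []
--     func = term[:term.index("(")]
--     args = []
--     inner = term[term.index("(")+1:-1]
--     balance = 0
--     current = ""
--     for ch in inner:
--         if ch == ',' and balance == 0:
--             args.append(current.strip())
--             current = ""
--         else:
--             current += ch
--             if ch == '(':
--                 balance += 1
--             elif ch == ')':
--                 balance -= 1
--     if current:
--         args.append(current.strip())
--     return func, args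
--
-- def apply(subs, term):
--     # apply substitutions inside nested structures
--     if is_var(term) and term in subs:
--         return apply(subs, subs[term])
--     func, args = parse_term(term)
--     if not args:
--         return subs.get(term, term)
--     new_args = [apply(subs, a) for a in args]
--     return f"{func}({','.join(new_args)})"
-- ===== SOURCE B (Python) =====
-- # B: iterative variable chasing plus a split-and-regroup argument splitter
-- # (comma-split then merge paren-unbalanced pieces) instead of A's recursive
-- # chase and character-by-character depth scan; objective: alternative.
-- def apply(subs, term):
--     while len(term) == 1 and term.islower() and term in subs:
--         term = subs[term]
--     func, args = _split(term)
--     if not args: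
--         return subs.get(term, term)
--     return func + "(" + ",".join(apply(subs, a) for a in args) + ")"
--
-- def _split(term):
--     s = term.strip()
--     i = s.find("(")
--     if i < 0:
--         return s, []
--     groups = []
--     for piece in s[i + 1:-1].split(","):
--         if groups and groups[-1].count("(") != groups[-1].count(")"):
--             groups[-1] += "," + piece
--         else:
--             groups.append(piece)
--     if groups[-1] == "":
--         groups.pop()
--     return s[:i], [g.strip() for g in groups]
-- ===== Notes on version B (the rewrite author's own statement) =====
-- stated objective: alternative
-- what changed: B replaces A's recursive variable chasing with an iterative while-loop chase and replaces A's character-by-character depth-counting argument scanner with a split-and-regroup splitter: split the inner text at every comma, then merge a piece into the previous group whenever that group's parentheses counts are unbalanced; Pre_ excludes cyclic substitution maps, on which A hits RecursionError.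
-- outside the precondition, e.g. on apply({'x': 'ax'}, 'x'): A returns 'ax', B returns 'ax'; on apply({'x': 'x'}, 'x'): A raises RecursionError, B does not finish within the time limit
import Mathlib
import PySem

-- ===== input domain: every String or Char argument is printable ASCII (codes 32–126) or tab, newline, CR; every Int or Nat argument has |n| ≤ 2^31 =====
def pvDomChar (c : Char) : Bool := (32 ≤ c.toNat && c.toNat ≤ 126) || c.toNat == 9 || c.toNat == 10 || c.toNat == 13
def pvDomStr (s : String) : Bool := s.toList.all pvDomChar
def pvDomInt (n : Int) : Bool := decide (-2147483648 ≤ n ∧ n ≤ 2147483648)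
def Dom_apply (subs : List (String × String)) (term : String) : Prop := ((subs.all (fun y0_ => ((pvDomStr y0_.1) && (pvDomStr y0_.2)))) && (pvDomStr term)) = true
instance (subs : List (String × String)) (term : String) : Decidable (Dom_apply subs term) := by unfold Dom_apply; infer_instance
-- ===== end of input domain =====

-- B re-implements A with an iterative variable chase (while-loop instead of A's
-- recursive self-call) and a split-and-regroup argument splitter (comma-split, then
-- merge paren-unbalanced pieces) instead of A's character scan; objective: alternative.


-- ===== PORT A =====
-- shared small helpers: dict lookup (first match, as Python dict built from the pairs)
def pvToL (subs : List (String × String)) : List (List Char × List Char) :=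
  subs.map (fun p => (p.1.toList, p.2.toList))

def pvLook (subs : List (List Char × List Char)) (k : List Char) : Option (List Char) :=
  PySem.Dict.get? ⟨subs⟩ k

-- subs.get(k, d)
def pvLookD (subs : List (List Char × List Char)) (k d : List Char) : List Char :=
  (pvLook subs k).getD d

-- len(t) == 1 and t.islower()  (exact for length-1 strings on the ASCII domain)
def pvIsVar (t : List Char) : Bool :=
  t.length == 1 && (match t with | [c] => PySem.Chars.islower c | _ => false)

-- ---- termination ranking (not part of either Python; used only by the totality
-- ---- guards of the recursive ports and by Pre_apply) ----
-- c is a bound variable letter: lowercase and "[c]" is a key of subs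
def pvIsVarKey (subs : List (List Char × List Char)) (c : Char) : Bool :=
  PySem.Chars.islower c && (pvLook subs [c]).isSome

-- variable letters a bound variable letter directly depends on
def pvSucc (subs : List (List Char × List Char)) (c : Char) : List Char :=
  match pvLook subs [c] with
  | some v => v.filter (pvIsVarKey subs)
  | none => []

-- fueled longest-dependency-path length of a variable letter
def pvRankF (subs : List (List Char × List Char)) : Nat → Char → Nat
  | 0, _ => 0
  | n + 1, c => (pvSucc subs c).foldl (fun m d => max m (1 + pvRankF subs n d)) 0

def pvRankC (subs : List (List Char × List Char)) (c : Char) : Nat := pvRankF subs 27 c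

-- rank of a string: worst rank of any bound variable letter occurring in it
def pvRank (subs : List (List Char × List Char)) (t : List Char) : Nat :=
  t.foldl (fun m c => max m (if pvIsVarKey subs c then 1 + pvRankC subs c else 0)) 0

-- the for-loop body of A's parse_term
def pvSplitStep (st : List (List Char) × List Char × Int) (ch : Char) :
    List (List Char) × List Char × Int :=
  if ch = ',' ∧ st.2.2 = 0 then (st.1 ++ [PySem.Chars.strip st.2.1], [], st.2.2)
  else
    (st.1, st.2.1 ++ [ch],
      if ch = '(' then st.2.2 + 1 else if ch = ')' then st.2.2 - 1 else st.2.2)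

-- A's parse_term, step for step
def pvParseTerm (term : List Char) : List Char × List (List Char) :=
  let t := PySem.Chars.strip term
  if PySem.Chars.isIn ['('] t = false then (t, [])
  else
    let i := t.idxOf '('                                           -- term.index("(")
    let func := t.take i                                           -- term[:i]
    let inner := PySem.List.slice t (some ((i : Int) + 1)) (some (-1))  -- term[i+1:-1]
    let st := inner.foldl pvSplitStep ([], [], (0 : Int))
    (func, if st.2.1 ≠ [] then st.1 ++ [PySem.Chars.strip st.2.1] else st.1)

-- ---- lemmas cited by the ports' decreasing_by (termination only) ----
theorem pv_strip_sublist (s : List Char) : (PySem.Chars.strip s).Sublist s := by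
  unfold PySem.Chars.strip PySem.Chars.rstrip PySem.Chars.lstrip
  have h1 : (List.dropWhile PySem.Chars.isspace (List.dropWhile PySem.Chars.isspace s).reverse).reverse.Sublist
      ((List.dropWhile PySem.Chars.isspace s).reverse).reverse :=
    (List.dropWhile_sublist _).reverse
  simp only [List.reverse_reverse] at h1
  exact h1.trans (List.dropWhile_sublist _)

theorem pv_strip_length_le (s : List Char) : (PySem.Chars.strip s).length ≤ s.length :=
  (pv_strip_sublist s).length_le

theorem pv_strip_mem {c : Char} {s : List Char} (h : c ∈ PySem.Chars.strip s) : c ∈ s :=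
  (pv_strip_sublist s).mem h

theorem pv_isIn_single (c : Char) (s : List Char) :
    PySem.Chars.isIn [c] s = true ↔ c ∈ s := by
  rw [PySem.Chars.isIn_iff_infix]
  constructor
  · intro h; exact h.sublist.mem (List.mem_singleton_self c)
  · intro h
    obtain ⟨l1, l2, rfl⟩ := List.append_of_mem h
    exact ⟨l1, l2, by simp⟩

-- invariants of A's splitter loop: total size bound and character provenance
theorem pv_split_sum (l : List Char) : ∀ (done : List (List Char)) (cur : List Char) (bal : Int),
    ((l.foldl pvSplitStep (done, cur, bal)).1.map (fun p => p.length + 1)).sum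
        + (l.foldl pvSplitStep (done, cur, bal)).2.1.length
      ≤ (done.map (fun p => p.length + 1)).sum + cur.length + l.length := by
  induction l with
  | nil => intro done cur bal; simp
  | cons ch l ih =>
      intro done cur bal
      simp only [List.foldl_cons, pvSplitStep]
      split_ifs with h1 <;>
        · refine le_trans (ih _ _ _) ?_
          have := pv_strip_length_le cur
          simp [List.map_append]
          omega

theorem pv_split_chars (l : List Char) : ∀ (done : List (List Char)) (cur : List Char) (bal : Int)
    (S : List Char), (∀ p ∈ done, ∀ c ∈ p, c ∈ S) → (∀ c ∈ cur, c ∈ S) → (∀ c ∈ l, c ∈ S) →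
    (∀ p ∈ (l.foldl pvSplitStep (done, cur, bal)).1, ∀ c ∈ p, c ∈ S)
    ∧ (∀ c ∈ (l.foldl pvSplitStep (done, cur, bal)).2.1, c ∈ S) := by
  induction l with
  | nil => intro done cur bal S hd hc hl; simpa using ⟨hd, hc⟩
  | cons ch l ih =>
      intro done cur bal S hd hc hl
      have hch : ch ∈ S := hl ch (by simp)
      have hl' : ∀ c ∈ l, c ∈ S := fun c hcl => hl c (by simp [hcl])
      simp only [List.foldl_cons, pvSplitStep]
      have hcur : ∀ c ∈ cur ++ [ch], c ∈ S := by
        intro c hcc; rcases List.mem_append.mp hcc with h | h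
        · exact hc c h
        · simp at h; subst h; exact hch
      split_ifs with h1 h2 h3
      · refine ih _ _ _ S ?_ (by simp) hl'
        intro p hp c hcp
        rcases List.mem_append.mp hp with h | h
        · exact hd p h c hcp
        · simp at h; subst h; exact hc c (pv_strip_mem hcp)
      · exact ih _ _ _ S hd hcur hl'
      · exact ih _ _ _ S hd hcur hl'
      · exact ih _ _ _ S hd hcur hl'

theorem pv_parseTerm_mem {t a : List Char} (h : a ∈ (pvParseTerm t).2) :
    a.length < t.length ∧ ∀ c ∈ a, c ∈ t := by
  by_cases hp : PySem.Chars.isIn ['('] (PySem.Chars.strip t) = true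
  · have hs : '(' ∈ PySem.Chars.strip t := (pv_isIn_single _ _).mp hp
    have hslen : 0 < (PySem.Chars.strip t).length := List.length_pos_of_mem hs
    have hsle : (PySem.Chars.strip t).length ≤ t.length := pv_strip_length_le t
    simp only [pvParseTerm] at h
    rw [if_neg (by simp [hp])] at h
    simp only at h
    generalize hinner : PySem.List.slice (PySem.Chars.strip t)
        (some (((PySem.Chars.strip t).idxOf '(' : Int) + 1)) (some (-1)) = inner at h
    have hinlen : inner.length ≤ (PySem.Chars.strip t).length - 2 := by
      rw [← hinner]
      have hcast : (((PySem.Chars.strip t).idxOf '(' : Int) + 1)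
          = (((PySem.Chars.strip t).idxOf '(' + 1 : Nat) : Int) := by push_cast; ring
      rw [hcast, PySem.List.length_slice, PySem.List.clampIdx_neg_one, PySem.List.clampIdx_natCast]
      omega
    have hinmem : ∀ c ∈ inner, c ∈ PySem.Chars.strip t := fun c hc =>
      PySem.List.mem_of_mem_slice _ _ _ (hinner ▸ hc)
    obtain ⟨st, hst⟩ : ∃ st, inner.foldl pvSplitStep ([], [], (0 : Int)) = st := ⟨_, rfl⟩
    have hsum := pv_split_sum inner [] [] 0
    have hchars := pv_split_chars inner [] [] 0 inner (by simp) (by simp) (fun c hc => hc)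
    rw [hst] at hsum hchars h
    simp only [List.map_nil, List.sum_nil, List.length_nil, Nat.zero_add] at hsum
    have hmem : a ∈ st.1 ∨ a = PySem.Chars.strip st.2.1 := by
      by_cases hcn : st.2.1 = []
      · rw [if_neg (by simp [hcn])] at h
        exact Or.inl h
      · rw [if_pos (by simpa using hcn)] at h
        rcases List.mem_append.mp h with h1 | h1
        · exact Or.inl h1
        · simp at h1; exact Or.inr h1
    constructor
    · rcases hmem with h1 | rfl
      · have : a.length + 1 ≤ (st.1.map (fun p => p.length + 1)).sum :=
          List.single_le_sum (fun x _ => Nat.zero_le x) _ (List.mem_map_of_mem h1)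
        omega
      · have := pv_strip_length_le st.2.1
        omega
    · intro c hc
      rcases hmem with h1 | rfl
      · exact pv_strip_mem (hinmem c (hchars.1 a h1 c hc))
      · exact pv_strip_mem (hinmem c (hchars.2 c (pv_strip_mem hc)))
  · exfalso
    have : (pvParseTerm t).2 = [] := by
      simp only [pvParseTerm]
      rw [if_pos (by revert hp; cases PySem.Chars.isIn ['('] (PySem.Chars.strip t) <;> simp)]
    rw [this] at h
    simp at h

theorem pv_foldl_max_base (f : Char → Nat) (l : List Char) (a : Nat) :
    a ≤ l.foldl (fun m c => max m (f c)) a := by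
  induction l generalizing a with
  | nil => simp
  | cons c l ih => exact le_trans (le_max_left _ _) (ih _)

theorem pv_foldl_max_ge (f : Char → Nat) {c : Char} {l : List Char} (h : c ∈ l) (a : Nat) :
    f c ≤ l.foldl (fun m d => max m (f d)) a := by
  induction l generalizing a with
  | nil => simp at h
  | cons d l ih =>
      rcases List.mem_cons.mp h with rfl | h
      · exact le_trans (le_max_right _ _) (pv_foldl_max_base f l _)
      · exact ih h _

theorem pv_foldl_max_le (f : Char → Nat) {l : List Char} {B : Nat} {a : Nat} (ha : a ≤ B)
    (h : ∀ c ∈ l, f c ≤ B) : l.foldl (fun m c => max m (f c)) a ≤ B := by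
  induction l generalizing a with
  | nil => simpa
  | cons c l ih => exact ih (max_le ha (h c (by simp))) (fun d hd => h d (by simp [hd]))

theorem pv_rank_mono (subs : List (List Char × List Char)) {a t : List Char}
    (h : ∀ c ∈ a, c ∈ t) : pvRank subs a ≤ pvRank subs t := by
  unfold pvRank
  refine pv_foldl_max_le (fun c => if pvIsVarKey subs c = true then 1 + pvRankC subs c else 0)
    (Nat.zero_le _) ?_
  intro c hc
  exact pv_foldl_max_ge (fun c => if pvIsVarKey subs c = true then 1 + pvRankC subs c else 0)
    (h c hc) 0

-- A's apply, step for step; the rank guard only makes the recursion total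
-- (it always holds on inputs satisfying Pre_apply)
def pvApplyA (subs : List (List Char × List Char)) (t : List Char) : List Char :=
  match pvIsVar t, pvLook subs t with
  | true, some v =>
      if _hg : pvRank subs v < pvRank subs t then pvApplyA subs v
      else v
  | _, _ =>
      let p := pvParseTerm t
      if p.2.isEmpty then pvLookD subs t t
      else p.1 ++ ['('] ++ PySem.Chars.join [','] (p.2.attach.map (fun a => pvApplyA subs a.1)) ++ [')']
termination_by (pvRank subs t, t.length)
decreasing_by
  · exact Prod.Lex.left _ _ _hg
  · have hm := pv_parseTerm_mem a.2
    rcases Nat.lt_or_ge (pvRank subs a.1) (pvRank subs t) with hlt | hge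
    · exact Prod.Lex.left _ _ hlt
    · have : pvRank subs a.1 = pvRank subs t :=
        Nat.le_antisymm (pv_rank_mono subs hm.2) hge
      rw [this]; exact Prod.Lex.right _ hm.1

def apply (subs : List (String × String)) (term : String) : String :=
  String.ofList (pvApplyA (pvToL subs) term.toList)

-- ===== PORT B =====
-- B's while loop: follow single-letter variable bindings until the term is no longer
-- a bound variable; the rank guard only makes the recursion total
def pvChase (subs : List (List Char × List Char)) (t : List Char) : List Char :=
  match pvIsVar t, pvLook subs t with
  | true, some v =>
      if _hg : pvRank subs v < pvRank subs t then pvChase subs v else t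
  | _, _ => t
termination_by pvRank subs t
decreasing_by exact _hg

-- (cited by pvApplyB's decreasing_by)
theorem pv_chase_le (subs : List (List Char × List Char)) :
    ∀ (r : Nat) (t : List Char), pvRank subs t < r →
      pvRank subs (pvChase subs t) ≤ pvRank subs t := by
  intro r
  induction r with
  | zero => intro t h; omega
  | succ r ih =>
      intro t h
      rw [pvChase.eq_def]
      cases hiv : pvIsVar t with
      | false => cases pvLook subs t <;> simp
      | true =>
          cases hlk : pvLook subs t with
          | none => simp
          | some v =>
              simp only
              by_cases hg : pvRank subs v < pvRank subs t
              · rw [dif_pos hg]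
                have := ih v (by omega)
                omega
              · rw [dif_neg hg]

theorem pv_chase_fix (subs : List (List Char × List Char)) (t : List Char)
    (h : pvRank subs (pvChase subs t) = pvRank subs t) : pvChase subs t = t := by
  rw [pvChase.eq_def]
  cases hiv : pvIsVar t with
  | false => cases pvLook subs t <;> simp
  | true =>
      cases hlk : pvLook subs t with
      | none => simp
      | some v =>
          simp only
          by_cases hg : pvRank subs v < pvRank subs t
          · exfalso
            have hev : pvChase subs t = pvChase subs v := by
              rw [pvChase.eq_def]; simp only [hiv, hlk]; rw [dif_pos hg]
            have hle := pv_chase_le subs (pvRank subs v + 1) v (Nat.lt_succ_self _)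
            rw [hev] at h
            omega
          · rw [dif_neg hg]

-- the loop body of B's regrouping pass
def pvRegroupStep (gs : List (List Char)) (p : List Char) : List (List Char) :=
  match gs.getLast? with
  | some l =>
      if PySem.Chars.count l ['('] ≠ PySem.Chars.count l [')'] then
        gs.dropLast ++ [l ++ ',' :: p]
      else gs ++ [p]
  | none => gs ++ [p]

-- B's _split: comma-split the inner slice, merge unbalanced pieces, drop an empty
-- trailing field, strip
def pvSplitB (term : List Char) : List Char × List (List Char) :=
  let s := PySem.Chars.strip term
  let i := PySem.Chars.find s ['(']
  if i < 0 then (s, [])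
  else
    let pieces := PySem.Chars.splitOn (PySem.List.slice s (some (i + 1)) (some (-1))) [',']
    let gs := pieces.foldl pvRegroupStep []
    let gs2 := if gs.getLast? = some [] then gs.dropLast else gs
    (s.take i.toNat, gs2.map PySem.Chars.strip)

-- PySem's str.split on a one-character separator is List.splitOn
theorem pv_splitOn_go (c : Char) : ∀ (fuel : Nat) (l cur : List Char) (acc : List (List Char)),
    l.length < fuel →
    PySem.Chars.splitOn.go [c] fuel l cur acc
      = acc.reverse ++ (l.splitOn c).modifyHead (fun p => cur.reverse ++ p) := by
  intro fuel
  induction fuel with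
  | zero => intro l cur acc h; omega
  | succ n ih =>
      intro l cur acc h
      cases l with
      | nil => simp [PySem.Chars.splitOn.go, List.splitOn]
      | cons x t =>
          rw [PySem.Chars.splitOn.go]
          simp only [List.isPrefixOf, List.isPrefixOf_nil_left, Bool.and_true, List.length_cons,
            List.drop_succ_cons, List.drop_zero, List.length_nil]
          by_cases hx : c = x
          · rw [if_pos (by simp [hx])]
            rw [ih t [] (cur.reverse :: acc) (by simpa using h)]
            subst hx
            cases hsp : t.splitOnP (fun y => y == c) with
            | nil => exact absurd hsp (List.splitOnP_ne_nil _ t)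
            | cons p ps => simp [List.splitOn, List.splitOnP_cons, hsp]
          · rw [if_neg (by simp [hx])]
            rw [ih t (x :: cur) acc (by simpa using h)]
            cases hsp : t.splitOnP (fun y => y == c) with
            | nil => exact absurd hsp (List.splitOnP_ne_nil _ t)
            | cons p ps => simp [List.splitOn, List.splitOnP_cons, hsp, Ne.symm hx]

theorem pv_splitOn_single (s : List Char) (c : Char) :
    PySem.Chars.splitOn s [c] = s.splitOn c := by
  unfold PySem.Chars.splitOn
  rw [pv_splitOn_go c (s.length + 1) s [] [] (by omega)]
  have hne := List.splitOnP_ne_nil (fun y => y == c) s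
  cases hsp : s.splitOnP (fun y => y == c) with
  | nil => exact absurd hsp hne
  | cons p ps => simp [List.splitOn, hsp]

theorem pv_splitOn_recon (c : Char) : ∀ (s : List Char) {h : List Char} {tl : List (List Char)},
    s.splitOn c = h :: tl → s = h ++ (tl.map (fun p => c :: p)).flatten := by
  intro s
  induction s with
  | nil =>
      intro h tl hsp
      simp [List.splitOn, List.splitOnP_nil] at hsp
      simp [hsp.1, hsp.2]
  | cons x t ih =>
      intro h tl hsp
      rw [List.splitOn, List.splitOnP_cons] at hsp
      cases hsp2 : t.splitOnP (fun y => y == c) with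
      | nil => exact absurd hsp2 (List.splitOnP_ne_nil _ t)
      | cons q qs =>
          have hq := ih (h := q) (tl := qs) (by simp [List.splitOn, hsp2])
          by_cases hx : x = c
          · rw [if_pos (by simp [hx]), hsp2] at hsp
            cases hsp
            subst hx
            simp [hq]
          · rw [if_neg (by simp [hx]), hsp2] at hsp
            simp only [List.modifyHead_cons] at hsp
            cases hsp
            simp [hq]


-- ---- size/character bounds of B's splitter (cited by pvApplyB's decreasing_by) ----
theorem pv_splitOn_len (c : Char) (s : List Char) {h : List Char} {tl : List (List Char)}
    (hsp : s.splitOn c = h :: tl) :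
    s.length = h.length + (tl.map (fun p => p.length + 1)).sum := by
  have hr := pv_splitOn_recon c s hsp
  rw [hr]
  simp [List.length_flatten, Function.comp_def, Nat.add_comm]

theorem pv_splitOn_subset (c : Char) (s : List Char) :
    ∀ p ∈ s.splitOn c, ∀ x ∈ p, x ∈ s := by
  intro p hp x hx
  cases hsp : s.splitOn c with
  | nil => rw [hsp] at hp; simp at hp
  | cons h tl =>
      rw [hsp] at hp
      have hr := pv_splitOn_recon c s hsp
      rw [hr]
      rcases List.mem_cons.mp hp with rfl | hp
      · exact List.mem_append.mpr (Or.inl hx)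
      · refine List.mem_append.mpr (Or.inr ?_)
        exact List.mem_flatten.mpr ⟨c :: p, List.mem_map_of_mem hp, by simp [hx]⟩

theorem pv_comma_mem {c : Char} {s : List Char} {h : List Char} {tl : List (List Char)}
    (hsp : s.splitOn c = h :: tl) (htl : tl ≠ []) : c ∈ s := by
  have hr := pv_splitOn_recon c s hsp
  rw [hr]
  cases tl with
  | nil => exact absurd rfl htl
  | cons q qs => simp

theorem pv_regroup_sum : ∀ (ps gs : List (List Char)),
    ((ps.foldl pvRegroupStep gs).map (fun g => g.length + 1)).sum
      ≤ (gs.map (fun g => g.length + 1)).sum + (ps.map (fun p => p.length + 1)).sum := by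
  intro ps
  induction ps with
  | nil => intro gs; simp
  | cons p ps ih =>
      intro gs
      rw [List.foldl_cons]
      refine le_trans (ih _) ?_
      have hstep : ((pvRegroupStep gs p).map (fun g => g.length + 1)).sum
          ≤ (gs.map (fun g => g.length + 1)).sum + (p.length + 1) := by
        unfold pvRegroupStep
        cases hgl : gs.getLast? with
        | none => simp
        | some l =>
            obtain ⟨gs0, rfl⟩ := List.getLast?_eq_some_iff.mp hgl
            dsimp only
            by_cases hb : PySem.Chars.count l ['('] ≠ PySem.Chars.count l [')']
            · rw [if_pos hb]
              simp [List.map_append]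
              omega
            · rw [if_neg hb]
              simp [List.map_append]
              omega
      simp only [List.map_cons, List.sum_cons]
      omega

theorem pv_regroup_chars : ∀ (ps gs : List (List Char)) (S : List Char), ',' ∈ S →
    (∀ p ∈ ps, ∀ x ∈ p, x ∈ S) → (∀ g ∈ gs, ∀ x ∈ g, x ∈ S) →
    ∀ g ∈ ps.foldl pvRegroupStep gs, ∀ x ∈ g, x ∈ S := by
  intro ps
  induction ps with
  | nil => intro gs S _ _ hgs; simpa using hgs
  | cons p ps ih =>
      intro gs S hcm hps hgs
      rw [List.foldl_cons]
      refine ih _ S hcm (fun q hq => hps q (by simp [hq])) ?_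
      intro g hg x hx
      have hp : ∀ x ∈ p, x ∈ S := hps p (by simp)
      unfold pvRegroupStep at hg
      cases hgl : gs.getLast? with
      | none =>
          rw [hgl] at hg
          dsimp only at hg
          rcases List.mem_append.mp hg with h1 | h1
          · exact hgs g h1 x hx
          · simp at h1; subst h1; exact hp x hx
      | some l =>
          obtain ⟨gs0, rfl⟩ := List.getLast?_eq_some_iff.mp hgl
          rw [hgl] at hg
          dsimp only at hg
          have hl : ∀ x ∈ l, x ∈ S := hgs l (by simp)
          have hgs0 : ∀ g ∈ gs0, ∀ x ∈ g, x ∈ S := fun g h1 => hgs g (by simp [h1])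
          by_cases hb : PySem.Chars.count l ['('] ≠ PySem.Chars.count l [')']
          · rw [if_pos hb] at hg
            rw [List.dropLast_concat] at hg
            rcases List.mem_append.mp hg with h1 | h1
            · exact hgs0 g h1 x hx
            · simp at h1; subst h1
              rcases List.mem_append.mp hx with h2 | h2
              · exact hl x h2
              · rcases List.mem_cons.mp h2 with rfl | h2
                · exact hcm
                · exact hp x h2
          · rw [if_neg hb] at hg
            rcases List.mem_append.mp hg with h1 | h1
            · exact hgs g h1 x hx
            · simp at h1; subst h1; exact hp x hx

theorem pv_splitB_mem {t a : List Char} (h : a ∈ (pvSplitB t).2) :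
    a.length < t.length ∧ ∀ c ∈ a, c ∈ t := by
  by_cases hneg : PySem.Chars.find (PySem.Chars.strip t) ['('] < 0
  · unfold pvSplitB at h
    rw [if_pos hneg] at h
    simp at h
  · have hnn : 0 ≤ PySem.Chars.find (PySem.Chars.strip t) ['('] := by omega
    have hinf : ['('] <:+: PySem.Chars.strip t := by
      rw [← PySem.Chars.find_nonneg_iff]; exact hnn
    have hmem : '(' ∈ PySem.Chars.strip t := hinf.sublist.mem (by simp)
    have hslen : 0 < (PySem.Chars.strip t).length := List.length_pos_of_mem hmem
    have hsle := pv_strip_length_le t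
    unfold pvSplitB at h
    rw [if_neg hneg] at h
    simp only at h
    rw [pv_splitOn_single] at h
    generalize hinner : PySem.List.slice (PySem.Chars.strip t)
        (some (PySem.Chars.find (PySem.Chars.strip t) ['('] + 1)) (some (-1)) = inner at h
    have hinlen : inner.length ≤ (PySem.Chars.strip t).length - 2 := by
      rw [← hinner]
      have hc1 : PySem.Chars.find (PySem.Chars.strip t) ['('] + 1
          = (((PySem.Chars.find (PySem.Chars.strip t) ['(']).toNat + 1 : Nat) : Int) := by
        omega
      rw [hc1, PySem.List.length_slice, PySem.List.clampIdx_neg_one, PySem.List.clampIdx_natCast]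
      omega
    have hinmem : ∀ c ∈ inner, c ∈ PySem.Chars.strip t := fun c hc =>
      PySem.List.mem_of_mem_slice _ _ _ (hinner ▸ hc)
    cases hsp : inner.splitOn ',' with
    | nil =>
        exact absurd hsp (by rw [List.splitOn]; exact List.splitOnP_ne_nil _ inner)
    | cons p0 tl =>
        rw [hsp] at h
        obtain ⟨g, hg, rfl⟩ := List.mem_map.mp h
        have hg' : g ∈ (p0 :: tl).foldl pvRegroupStep [] := by
          by_cases hq : ((p0 :: tl).foldl pvRegroupStep []).getLast? = some []
          · rw [if_pos hq] at hg
            exact (List.dropLast_sublist _).mem hg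
          · rwa [if_neg hq] at hg
        have hpieces : ∀ p ∈ p0 :: tl, ∀ x ∈ p, x ∈ inner := fun p hp =>
          pv_splitOn_subset ',' inner p (hsp ▸ hp)
        have hchars : ∀ x ∈ g, x ∈ inner := by
          cases htl : tl with
          | nil =>
              subst htl
              have : (([p0] : List (List Char)).foldl pvRegroupStep []) = [p0] := by
                simp [pvRegroupStep]
              rw [this] at hg'
              simp at hg'
              subst hg'
              exact hpieces g (by simp)
          | cons q qs =>
              have hcm : ',' ∈ inner := pv_comma_mem hsp (by simp [htl])
              exact pv_regroup_chars (p0 :: tl) [] inner hcm hpieces (by simp) g hg'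
        have hlen : g.length ≤ inner.length := by
          have hsum := pv_regroup_sum (p0 :: tl) []
          have hone : g.length + 1
              ≤ (((p0 :: tl).foldl pvRegroupStep []).map (fun g => g.length + 1)).sum :=
            List.single_le_sum (fun x _ => Nat.zero_le x) _ (List.mem_map_of_mem hg')
          have htot := pv_splitOn_len ',' inner hsp
          simp only [List.map_cons, List.sum_cons, List.map_nil, List.sum_nil,
            Nat.zero_add] at hsum
          omega
        constructor
        · have := pv_strip_length_le g
          omega
        · intro c hc
          exact pv_strip_mem (hinmem c (hchars c (pv_strip_mem hc)))

-- B's apply: chase, split, then rebuild over the recursively rewritten arguments;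
-- the rank guard inside pvChase only makes the recursion total
def pvApplyB (subs : List (List Char × List Char)) (t : List Char) : List Char :=
  let t' := pvChase subs t
  let fa := pvSplitB t'
  if fa.2.isEmpty then pvLookD subs t' t'
  else fa.1 ++ ['('] ++ PySem.Chars.join [','] (fa.2.attach.map (fun a => pvApplyB subs a.1)) ++ [')']
termination_by (pvRank subs t, t.length)
decreasing_by
  have hm := pv_splitB_mem a.2
  have h1 : pvRank subs a.1 ≤ pvRank subs (pvChase subs t) := pv_rank_mono subs hm.2
  have h2 := pv_chase_le subs (pvRank subs t + 1) t (Nat.lt_succ_self _)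
  rcases Nat.lt_or_ge (pvRank subs a.1) (pvRank subs t) with hlt | hge
  · exact Prod.Lex.left _ _ hlt
  · have heq : pvRank subs (pvChase subs t) = pvRank subs t :=
      Nat.le_antisymm h2 (le_trans hge h1)
    have hfix : pvChase subs t = t := pv_chase_fix subs t heq
    have hlen : (a : List Char).length < t.length := by
      rw [← hfix]; exact hm.1
    rw [Nat.le_antisymm (h1.trans h2) hge]
    exact Prod.Lex.right _ hlen

def apply_alt (subs : List (String × String)) (term : String) : String :=
  String.ofList (pvApplyB (pvToL subs) term.toList)

-- ===== PRECONDITION & SPEC =====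
-- Pre_apply excludes substitution maps whose variable-dependency graph is cyclic: on
-- those A recurses through the bindings forever (RecursionError). The condition is on
-- the INPUT only: the finite graph on bound variable letters (edge x → y when the
-- letter y, itself a key, occurs anywhere in subs[x]; at most 26 lowercase letters)
-- must be acyclic, stated as stabilization of its longest-path ranking (pvRankF), a
-- graph property of subs — not a run of either program. Being letter-level, it also
-- excludes a few returning inputs where a bound letter occurs only inside a longer
-- atom (e.g. {'x': 'ax'}, where A returns 'ax').
def pvPreL (subs : List (List Char × List Char)) : Prop :=
  (subs.all (fun p => p.1.all (fun c => pvRankF subs 26 c == pvRankF subs 27 c))) = true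

def Pre_apply (subs : List (String × String)) (term : String) : Prop :=
  pvPreL (pvToL subs)

instance (subs : List (String × String)) (term : String) : Decidable (Pre_apply subs term) := by
  unfold Pre_apply pvPreL; infer_instance

def pvWitness_apply : (List (String × String)) × String :=
  ([("x", "f(a,b)"), ("a", "g(y)")], "h(x, y,q(x))")

def Spec_apply (subs : List (String × String)) (term : String) (out : String) : Prop :=
  out = apply_alt subs term
instance (subs : List (String × String)) (term : String) (out : String) : Decidable (Spec_apply subs term out) := by
  unfold Spec_apply; infer_instance

-- ===== CLAIM (what is proved, stated in full; the proofs are below) =====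
def Claim_equal_apply : Prop := ∀ (subs : List (String × String)) (term : String), Dom_apply subs term → Pre_apply subs term → Spec_apply subs term (apply subs term)

-- ===== LEMMAS AND PROOFS =====
-- str.count of a one-character needle is the character count
theorem pv_count_go (c : Char) : ∀ (fuel : Nat) (l : List Char) (acc : Nat), l.length ≤ fuel →
    PySem.Chars.count.go [c] fuel l acc = acc + l.count c := by
  intro fuel
  induction fuel with
  | zero =>
      intro l acc h
      have : l = [] := List.length_eq_zero_iff.mp (Nat.le_zero.mp h)
      subst this
      simp [PySem.Chars.count.go]
  | succ n ih =>
      intro l acc h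
      cases l with
      | nil => simp [PySem.Chars.count.go]
      | cons x t =>
          rw [PySem.Chars.count.go]
          simp only [List.isPrefixOf, List.isPrefixOf_nil_left, Bool.and_true, List.length_cons,
            List.drop_succ_cons, List.drop_zero, List.length_nil]
          by_cases hx : c = x
          · rw [if_pos (by simp [hx])]
            rw [ih t (acc + 1) (by simpa using h)]
            subst hx
            simp
            omega
          · rw [if_neg (by simp [hx])]
            rw [ih t acc (by simpa using h)]
            simp [Ne.symm hx]

theorem pv_count_single (l : List Char) (c : Char) : PySem.Chars.count l [c] = l.count c := by
  unfold PySem.Chars.count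
  rw [if_neg (by simp)]
  simpa using pv_count_go c l.length l 0 le_rfl

-- ---- B's splitter computes A's parse (cited by pvApplyB's decreasing_by) ----
def pvAbal (l : List Char) : Int := (l.count '(' : Int) - (l.count ')' : Int)

theorem pv_abal_append (c : List Char) (x : Char) :
    pvAbal (c ++ [x]) = if x = '(' then pvAbal c + 1 else if x = ')' then pvAbal c - 1
      else pvAbal c := by
  simp only [pvAbal, List.count_append]
  by_cases h1 : x = '('
  · subst h1; simp; omega
  · by_cases h2 : x = ')'
    · subst h2; simp; omega
    · simp [h1, h2, Ne.symm h1, Ne.symm h2]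

theorem pv_scan_free (l : List Char) (hl : ',' ∉ l) :
    ∀ (d : List (List Char)) (c : List Char),
    l.foldl pvSplitStep (d, c, pvAbal c) = (d, c ++ l, pvAbal (c ++ l)) := by
  induction l with
  | nil => intro d c; simp
  | cons x l ih =>
      intro d c
      have hx : x ≠ ',' := fun h => hl (by simp [h])
      have hl' : ',' ∉ l := fun h => hl (by simp [h])
      have hstep : pvSplitStep (d, c, pvAbal c) x = (d, c ++ [x], pvAbal (c ++ [x])) := by
        simp only [pvSplitStep]
        rw [if_neg (by simp [hx])]
        rw [pv_abal_append]
      rw [List.foldl_cons, hstep, ih hl' d (c ++ [x])]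
      simp

-- B's regrouping over comma-free pieces reproduces A's scan of the commas-restored text
theorem pv_regroup_corr : ∀ (ps : List (List Char)), (∀ p ∈ ps, ',' ∉ p) →
    ∀ (gs : List (List Char)) (c : List Char),
    ∃ gs' c', ps.foldl pvRegroupStep (gs ++ [c]) = gs' ++ [c'] ∧
      ((ps.map (fun p => ',' :: p)).flatten).foldl pvSplitStep
          (gs.map PySem.Chars.strip, c, pvAbal c)
        = (gs'.map PySem.Chars.strip, c', pvAbal c') := by
  intro ps
  induction ps with
  | nil => intro _ gs c; exact ⟨gs, c, by simp, by simp⟩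
  | cons p ps ih =>
      intro hf gs c
      have hpf : ',' ∉ p := hf p (by simp)
      have hpsf : ∀ q ∈ ps, ',' ∉ q := fun q hq => hf q (by simp [hq])
      have hlast : (gs ++ [c]).getLast? = some c := by simp
      simp only [List.map_cons, List.flatten_cons, List.foldl_cons, List.foldl_append]
      by_cases hb : pvAbal c = 0
      · have hstep : pvRegroupStep (gs ++ [c]) p = (gs ++ [c]) ++ [p] := by
          simp only [pvRegroupStep, hlast]
          rw [if_neg (by simp only [pv_count_single, pvAbal] at hb ⊢; omega)]
        have hstepA : pvSplitStep (gs.map PySem.Chars.strip, c, pvAbal c) ','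
            = (gs.map PySem.Chars.strip ++ [PySem.Chars.strip c], [], pvAbal c) := by
          simp [pvSplitStep, hb]
        obtain ⟨gs', c', h1, h2⟩ := ih hpsf (gs ++ [c]) p
        refine ⟨gs', c', by rw [hstep]; exact h1, ?_⟩
        rw [hstepA]
        have hz : pvAbal c = pvAbal ([] : List Char) := by simpa [pvAbal] using hb
        rw [hz, pv_scan_free p hpf]
        simpa using h2
      · have hstep : pvRegroupStep (gs ++ [c]) p = gs ++ [c ++ ',' :: p] := by
          simp only [pvRegroupStep, hlast]
          rw [if_pos (by simp only [pv_count_single, pvAbal] at hb ⊢; omega)]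
          simp
        have hstepA : pvSplitStep (gs.map PySem.Chars.strip, c, pvAbal c) ','
            = (gs.map PySem.Chars.strip, c ++ [','], pvAbal (c ++ [','])) := by
          simp only [pvSplitStep]
          rw [if_neg (by simp [hb])]
          rw [pv_abal_append]
        obtain ⟨gs', c', h1, h2⟩ := ih hpsf gs (c ++ ',' :: p)
        refine ⟨gs', c', by rw [hstep]; exact h1, ?_⟩
        rw [hstepA, pv_scan_free p hpf]
        have : c ++ [','] ++ p = c ++ ',' :: p := by simp
        rw [this]
        exact h2

theorem pv_splitOn_free (c : Char) : ∀ (s : List Char), ∀ p ∈ s.splitOn c, c ∉ p := by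
  intro s
  induction s with
  | nil => simp [List.splitOn, List.splitOnP_nil]
  | cons x t ih =>
      intro p hp
      rw [List.splitOn, List.splitOnP_cons] at hp
      by_cases hx : x = c
      · rw [if_pos (by simp [hx])] at hp
        rcases List.mem_cons.mp hp with rfl | hp
        · simp
        · exact ih p hp
      · rw [if_neg (by simp [hx])] at hp
        cases hsp : t.splitOnP (fun y => y == c) with
        | nil => exact absurd hsp (List.splitOnP_ne_nil _ t)
        | cons q qs =>
            rw [hsp] at hp
            simp only [List.modifyHead_cons] at hp
            rcases List.mem_cons.mp hp with rfl | hp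
            · have hq : c ∉ q := ih q (by simp [List.splitOn, hsp])
              simp [hx, hq]
              intro hc
              exact absurd hc.symm hx
            · exact ih p (by simp [List.splitOn, hsp, hp])

-- str.find of "(" is the index A uses
theorem pv_idxOf_le (c : Char) : ∀ (s : List Char) (k : Nat), (hk : k < s.length) →
    s[k] = c → s.idxOf c ≤ k := by
  intro s
  induction s with
  | nil => intro k hk; simp at hk
  | cons x t ih =>
      intro k hk hg
      cases k with
      | zero =>
          have hx : x = c := by simpa using hg
          simp [List.idxOf_cons_eq t hx]
      | succ k =>
          by_cases hx : x = c
          · rw [List.idxOf_cons_eq t hx]; omega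
          · rw [List.idxOf_cons_ne t hx]
            have := ih k (by simpa using hk) (by simpa using hg)
            omega

theorem pv_find_pos {c : Char} {s : List Char} (h : c ∈ s) :
    PySem.Chars.find s [c] = (s.idxOf c : Int) := by
  have hinf : [c] <:+: s := by
    obtain ⟨l1, l2, rfl⟩ := List.append_of_mem h
    exact ⟨l1, l2, by simp⟩
  have hnn : 0 ≤ PySem.Chars.find s [c] := by
    rw [PySem.Chars.find_nonneg_iff]; exact hinf
  obtain ⟨hpre, hmin⟩ := PySem.Chars.find_spec hnn
  set k := (PySem.Chars.find s [c]).toNat with hk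
  obtain ⟨tl, htl⟩ := hpre
  have hdk : s.drop k = c :: tl := by simpa using htl.symm
  have hklen : k < s.length := by
    have h1 : (s.drop k).length = tl.length + 1 := by rw [hdk]; simp
    rw [List.length_drop] at h1
    omega
  have hsk : s[k] = c := by
    have h1 : (s.drop k)[0]'(by rw [hdk]; simp) = c := by simp [hdk]
    rw [List.getElem_drop] at h1
    simpa using h1
  have hle : s.idxOf c ≤ k := pv_idxOf_le c s k hklen hsk
  have hge : k ≤ s.idxOf c := by
    by_contra hlt
    push_neg at hlt
    have hidx : s.idxOf c < s.length := List.idxOf_lt_length_of_mem h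
    refine hmin (s.idxOf c) hlt ⟨s.drop (s.idxOf c + 1), ?_⟩
    have hg2 : s[s.idxOf c]'hidx = c := List.getElem_idxOf hidx
    rw [List.drop_eq_getElem_cons hidx, hg2]
    rfl
  have : k = s.idxOf c := le_antisymm hge hle
  omega

theorem pv_splitB_eq (t : List Char) : pvSplitB t = pvParseTerm t := by
  by_cases hp : PySem.Chars.isIn ['('] (PySem.Chars.strip t) = true
  · have hmem : '(' ∈ PySem.Chars.strip t := (pv_isIn_single _ _).mp hp
    have hfind := pv_find_pos hmem
    simp only [pvSplitB, pvParseTerm, hfind]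
    rw [if_neg (show ¬(PySem.Chars.isIn ['('] (PySem.Chars.strip t) = false) by simp [hp])]
    simp only [Int.toNat_natCast]
    rw [pv_splitOn_single]
    generalize hinner : PySem.List.slice (PySem.Chars.strip t)
        (some (((PySem.Chars.strip t).idxOf '(' : Int) + 1)) (some (-1)) = inner
    cases hsp : inner.splitOn ',' with
    | nil =>
        exact absurd hsp (by rw [List.splitOn]; exact List.splitOnP_ne_nil _ inner)
    | cons h0 tl =>
        have hrec := pv_splitOn_recon ',' inner hsp
        have hfree : ∀ p ∈ h0 :: tl, ',' ∉ p := by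
          intro p hp'
          exact pv_splitOn_free ',' inner p (hsp ▸ hp')
        have hfirst : pvRegroupStep [] h0 = [h0] := by simp [pvRegroupStep]
        obtain ⟨gs', c', h1, h2⟩ :=
          pv_regroup_corr tl (fun q hq => hfree q (by simp [hq])) [] h0
        have hfoldB : (h0 :: tl).foldl pvRegroupStep [] = gs' ++ [c'] := by
          rw [List.foldl_cons, hfirst]
          simpa using h1
        have hfoldA : inner.foldl pvSplitStep ([], [], (0 : Int))
            = (gs'.map PySem.Chars.strip, c', pvAbal c') := by
          rw [hrec, List.foldl_append]
          have hz : ((0 : Int)) = pvAbal ([] : List Char) := by simp [pvAbal]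
          rw [hz]
          have hh0 : (([] : List (List Char)).map PySem.Chars.strip, ([] : List Char),
              pvAbal ([] : List Char)) = (([] : List (List Char)).map PySem.Chars.strip,
              ([] : List Char), pvAbal ([] : List Char)) := rfl
          rw [pv_scan_free h0 (hfree h0 (by simp)) ([] : List (List Char)) ([] : List Char)]
          simpa using h2
        rw [hfoldB, hfoldA]
        dsimp only
        by_cases hc : c' = []
        · subst hc
          rw [if_pos (show ((gs' ++ [([] : List Char)]).getLast? = some ([] : List Char)) by simp),
            if_neg (show ¬(([] : List Char) ≠ ([] : List Char)) by simp)]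
          simp
        · rw [if_neg (show ¬((gs' ++ [c']).getLast? = some ([] : List Char)) by simp [hc]),
            if_pos hc]
          simp
  · have hnp : PySem.Chars.isIn ['('] (PySem.Chars.strip t) = false := by
      revert hp; cases PySem.Chars.isIn ['('] (PySem.Chars.strip t) <;> simp
    have hnm : '(' ∉ PySem.Chars.strip t := by
      intro hm
      rw [(pv_isIn_single '(' (PySem.Chars.strip t)).mpr hm] at hnp
      simp at hnp
    have hfind : PySem.Chars.find (PySem.Chars.strip t) ['('] = -1 := by
      rw [PySem.Chars.find_eq_neg_one_iff]
      intro hinf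
      exact hnm (hinf.sublist.mem (by simp))
    simp only [pvSplitB, pvParseTerm, hfind]
    rw [if_pos (show (-1 : Int) < 0 by norm_num), if_pos hnp]


theorem pv_look_mem {subs : List (List Char × List Char)} {k v : List Char}
    (h : pvLook subs k = some v) : (k, v) ∈ subs := by
  unfold pvLook PySem.Dict.get? at h
  obtain ⟨p, hp, hv⟩ := Option.map_eq_some_iff.mp h
  have hmem : p ∈ subs := List.mem_of_find?_eq_some hp
  have hkey : p.1 = k := by
    have := List.find?_some hp
    simpa using this
  have : p = (k, v) := by
    cases p; simp_all
  rwa [this] at hmem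

theorem pv_edge {subs : List (List Char × List Char)} (h : pvPreL subs) {c d : Char}
    (hd : d ∈ pvSucc subs c) : pvRankC subs d < pvRankC subs c := by
  have hdk : pvIsVarKey subs d = true := by
    unfold pvSucc at hd
    cases hv : pvLook subs [c] with
    | none => rw [hv] at hd; simp at hd
    | some v => rw [hv] at hd; exact (List.mem_filter.mp hd).2
  obtain ⟨vd, hvd⟩ : ∃ vd, pvLook subs [d] = some vd := by
    unfold pvIsVarKey at hdk
    simp only [Bool.and_eq_true] at hdk
    exact Option.isSome_iff_exists.mp hdk.2
  have hstab : pvRankF subs 26 d = pvRankF subs 27 d := by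
    have h1 := List.all_eq_true.mp h ([d], vd) (pv_look_mem hvd)
    have h2 := List.all_eq_true.mp h1 d (by simp)
    exact beq_iff_eq.mp h2
  have hunf : pvRankF subs 27 c
      = (pvSucc subs c).foldl (fun m e => max m (1 + pvRankF subs 26 e)) 0 := rfl
  have hge : 1 + pvRankF subs 26 d ≤ pvRankF subs 27 c := by
    rw [hunf]
    exact pv_foldl_max_ge (fun e => 1 + pvRankF subs 26 e) hd 0
  unfold pvRankC
  omega

theorem pv_rank_single {subs : List (List Char × List Char)} {x : Char}
    (hk : pvIsVarKey subs x = true) : pvRank subs [x] = 1 + pvRankC subs x := by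
  unfold pvRank
  simp [hk]

theorem pv_var_step {subs : List (List Char × List Char)} (h : pvPreL subs) {x : Char}
    {v : List Char} (hlow : PySem.Chars.islower x = true) (hv : pvLook subs [x] = some v) :
    pvRank subs v < pvRank subs [x] := by
  have hk : pvIsVarKey subs x = true := by unfold pvIsVarKey; rw [hv]; simp [hlow]
  rw [pv_rank_single hk]
  have hle : pvRank subs v ≤ pvRankC subs x := by
    unfold pvRank
    refine pv_foldl_max_le (fun c => if pvIsVarKey subs c = true then 1 + pvRankC subs c else 0)
      (Nat.zero_le _) ?_
    intro c hc
    by_cases hck : pvIsVarKey subs c = true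
    · have hcs : c ∈ pvSucc subs x := by
        unfold pvSucc; rw [hv]; exact List.mem_filter.mpr ⟨hc, hck⟩
      have := pv_edge h hcs
      simp only [hck, if_pos]
      omega
    · simp [hck]
  omega

theorem pv_isVar_iff {t : List Char} :
    pvIsVar t = true ↔ ∃ c, t = [c] ∧ PySem.Chars.islower c = true := by
  match t with
  | [] => simp [pvIsVar]
  | [c] => simp [pvIsVar]
  | c :: d :: r => simp [pvIsVar]

-- unfolding lemmas for the recursive ports
theorem pvApplyA_var {subs : List (List Char × List Char)} {t v : List Char}
    (hiv : pvIsVar t = true) (hlk : pvLook subs t = some v)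
    (hg : pvRank subs v < pvRank subs t) : pvApplyA subs t = pvApplyA subs v := by
  rw [pvApplyA.eq_def]
  simp only [hiv, hlk]
  rw [dif_pos hg]

theorem pvApplyA_parse {subs : List (List Char × List Char)} {t : List Char}
    (hnv : pvIsVar t = true → pvLook subs t = none) :
    pvApplyA subs t = (if (pvParseTerm t).2.isEmpty then pvLookD subs t t
      else (pvParseTerm t).1 ++ ['('] ++
        PySem.Chars.join [','] ((pvParseTerm t).2.map (fun a => pvApplyA subs a)) ++ [')']) := by
  rw [pvApplyA.eq_def]
  cases hiv : pvIsVar t with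
  | true =>
      rw [hnv hiv]
      simp
  | false =>
      cases hlk : pvLook subs t <;> simp

theorem pvChase_step {subs : List (List Char × List Char)} {t v : List Char}
    (hiv : pvIsVar t = true) (hlk : pvLook subs t = some v)
    (hg : pvRank subs v < pvRank subs t) : pvChase subs t = pvChase subs v := by
  rw [pvChase.eq_def]
  simp only [hiv, hlk]
  rw [dif_pos hg]

theorem pvChase_stay {subs : List (List Char × List Char)} {t : List Char}
    (hnv : pvIsVar t = true → pvLook subs t = none) : pvChase subs t = t := by
  rw [pvChase.eq_def]
  cases hiv : pvIsVar t with
  | true => rw [hnv hiv]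
  | false => cases pvLook subs t <;> simp

theorem pv_chase_nonvar {subs : List (List Char × List Char)} (h : pvPreL subs) :
    ∀ (r : Nat) (t : List Char), pvRank subs t < r →
      pvIsVar (pvChase subs t) = true → pvLook subs (pvChase subs t) = none := by
  intro r
  induction r with
  | zero => intro t hr; omega
  | succ r ih =>
      intro t hr
      by_cases hc : pvIsVar t = true ∧ (pvLook subs t).isSome
      · obtain ⟨hiv, hsome⟩ := hc
        obtain ⟨v, hlk⟩ := Option.isSome_iff_exists.mp hsome
        obtain ⟨x, rfl, hlow⟩ := pv_isVar_iff.mp hiv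
        have hg := pv_var_step h hlow hlk
        rw [pvChase_step hiv hlk hg]
        exact ih v (by omega)
      · have hnv : pvIsVar t = true → pvLook subs t = none := by
          intro hiv
          cases hlk : pvLook subs t with
          | none => rfl
          | some v => exact absurd ⟨hiv, by simp [hlk]⟩ hc
        rw [pvChase_stay hnv]
        intro hiv
        exact hnv hiv

theorem pv_applyA_chase {subs : List (List Char × List Char)} (h : pvPreL subs) :
    ∀ (r : Nat) (t : List Char), pvRank subs t < r →
      pvApplyA subs t = pvApplyA subs (pvChase subs t) := by
  intro r
  induction r with
  | zero => intro t hr; omega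
  | succ r ih =>
      intro t hr
      by_cases hc : pvIsVar t = true ∧ (pvLook subs t).isSome
      · obtain ⟨hiv, hsome⟩ := hc
        obtain ⟨v, hlk⟩ := Option.isSome_iff_exists.mp hsome
        obtain ⟨x, rfl, hlow⟩ := pv_isVar_iff.mp hiv
        have hg := pv_var_step h hlow hlk
        rw [pvApplyA_var hiv hlk hg, pvChase_step hiv hlk hg]
        exact ih v (by omega)
      · have hnv : pvIsVar t = true → pvLook subs t = none := by
          intro hiv
          cases hlk : pvLook subs t with
          | none => rfl
          | some v => exact absurd ⟨hiv, by simp [hlk]⟩ hc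
        rw [pvChase_stay hnv]

theorem pvApplyB_eq (subs : List (List Char × List Char)) (t : List Char) :
    pvApplyB subs t =
      (if (pvSplitB (pvChase subs t)).2.isEmpty then
        pvLookD subs (pvChase subs t) (pvChase subs t)
      else (pvSplitB (pvChase subs t)).1 ++ ['('] ++
        PySem.Chars.join [',']
          ((pvSplitB (pvChase subs t)).2.map (fun a => pvApplyB subs a)) ++ [')']) := by
  rw [pvApplyB.eq_def]
  simp

theorem pv_main_aux (subs : List (List Char × List Char)) (h : pvPreL subs) :
    ∀ (r l : Nat) (t : List Char), pvRank subs t < r → t.length < l →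
      pvApplyA subs t = pvApplyB subs t := by
  intro r
  induction r with
  | zero => intro l t hr; omega
  | succ r ihr =>
      intro l
      induction l with
      | zero => intro t hr hl; omega
      | succ l ihl =>
          intro t hr hl
          have hA := pv_applyA_chase h (pvRank subs t + 1) t (Nat.lt_succ_self _)
          have hnv : pvIsVar (pvChase subs t) = true → pvLook subs (pvChase subs t) = none :=
            pv_chase_nonvar h (pvRank subs t + 1) t (Nat.lt_succ_self _)
          rw [hA, pvApplyA_parse hnv, pvApplyB_eq, pv_splitB_eq]
          have h2 := pv_chase_le subs (pvRank subs t + 1) t (Nat.lt_succ_self _)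
          by_cases he : (pvParseTerm (pvChase subs t)).2.isEmpty
          · rw [if_pos he, if_pos he]
          · rw [if_neg he, if_neg he]
            congr 2
            congr 1
            refine List.map_congr_left ?_
            intro a ha
            have hm := pv_parseTerm_mem ha
            have h1 : pvRank subs a ≤ pvRank subs (pvChase subs t) := pv_rank_mono subs hm.2
            rcases Nat.lt_or_ge (pvRank subs a) (pvRank subs t) with hlt | hge
            · exact ihr (a.length + 1) a (by omega) (Nat.lt_succ_self _)
            · have heq : pvRank subs (pvChase subs t) = pvRank subs t :=
                Nat.le_antisymm h2 (le_trans hge h1)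
              have hfix := pv_chase_fix subs t heq
              rw [hfix] at hm
              exact ihl a (by omega) (by omega)

theorem pv_main (subs : List (List Char × List Char)) (h : pvPreL subs) :
    ∀ (t : List Char), pvApplyA subs t = pvApplyB subs t := by
  intro t
  exact pv_main_aux subs h (pvRank subs t + 1) (t.length + 1) t (by omega) (by omega)

-- ===== VERDICT (by name: the statement is the Claim_ definition above) =====
theorem apply_spec : Claim_equal_apply := by
  intro subs term _ hPre
  unfold Spec_apply apply apply_alt
  exact congrArg String.ofList (pv_main (pvToL subs) hPre term.toList)
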